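-- pv_equiv track=rewrite | github.com/swayli94/AeroOpt | AeroOpt/optimization/stochastic/nsgaiii.py | suggest_n_partitions
-- ===== SOURCE A (Python) =====
-- import math
--
-- def suggest_n_partitions(n_objective: int, population_size: int) -> int:
--     '''
--     Pick a simplex partition count so the number of reference points is near
--     `population_size` (combinatorial count C(p+M-1, M-1)).
--     '''
--     if n_objective <= 1:
--         return 1
--     best_p, best_d = 1, float('inf')
--     for p in range(1, 40):
--         n_ref = math.comb(p + n_objective - 1, n_objective - 1)
--         d = abs(n_ref - population_size)
--         if d < best_d:
--             best_d, best_p = d, p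
--     return max(1, best_p)
-- ===== SOURCE B (Python) =====
-- import math
--
--
-- def suggest_n_partitions(n_objective: int, population_size: int) -> int:
--     '''
--     Pick a simplex partition count so the number of reference points is near
--     `population_size` (combinatorial count C(p+M-1, M-1)).
--
--     Binary search: n_ref(p) is strictly increasing in p, so locate the largest
--     p in [1, 39] with n_ref(p) <= population_size and compare it with its
--     successor (ties go to the smaller p, as the first-minimum scan does).
--     '''
--     if n_objective <= 1:
--         return 1
--
--     def n_ref(p):
--         return math.comb(p + n_objective - 1, n_objective - 1)
--
--     if population_size < n_ref(1):
--         return 1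
--     lo, hi = 1, 39
--     while lo < hi:
--         mid = (lo + hi + 1) // 2
--         if n_ref(mid) <= population_size:
--             lo = mid
--         else:
--             hi = mid - 1
--     if lo == 39:
--         return 39
--     return lo if population_size - n_ref(lo) <= n_ref(lo + 1) - population_size else lo + 1
-- ===== Notes on version B (the rewrite author's own statement) =====
-- stated objective: faster
-- what changed: Replaces the fixed 39-iteration first-minimum scan with a binary search for the largest p with n_ref(p) <= population_size (n_ref is strictly increasing), then compares that boundary p with p+1, ties going to the smaller p.
import Mathlib
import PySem

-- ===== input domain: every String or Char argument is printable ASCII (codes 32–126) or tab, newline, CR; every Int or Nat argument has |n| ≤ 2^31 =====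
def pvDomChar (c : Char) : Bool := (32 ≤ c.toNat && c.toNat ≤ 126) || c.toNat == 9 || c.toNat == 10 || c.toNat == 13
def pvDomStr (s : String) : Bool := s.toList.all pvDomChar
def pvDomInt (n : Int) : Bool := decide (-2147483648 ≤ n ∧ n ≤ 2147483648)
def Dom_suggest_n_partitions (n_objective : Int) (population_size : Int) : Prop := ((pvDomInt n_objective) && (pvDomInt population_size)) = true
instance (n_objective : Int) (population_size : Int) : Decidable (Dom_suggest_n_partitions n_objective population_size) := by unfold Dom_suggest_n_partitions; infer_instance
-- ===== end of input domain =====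

-- B replaces A's fixed 39-step first-minimum scan by a binary search on the strictly
-- increasing reference-point count, comparing the boundary p with p+1 (objective: faster).

-- ===== PORT A =====
-- Shared helper: math.comb(n, k) exactly as CPython computes it (the symmetric
-- product formula over min(k, n-k) factors; each division is exact). Both Pythons
-- call this builtin; negative n with 0 ≤ k never occurs at either call site.
def combLoop (n r : Nat) : Nat :=
  (List.range r).foldl (fun acc i => acc * (n - r + i + 1) / (i + 1)) 1

def pyComb (n k : Int) : Int :=
  if k < 0 ∨ n < k then 0
  else (combLoop n.toNat (min k.toNat (n.toNat - k.toNat)) : Int)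

def suggest_n_partitions (n_objective : Int) (population_size : Int) : Int :=
  if n_objective ≤ 1 then 1
  else
    -- best_p = 1, best_d = float('inf'); the `none` state is the infinite distance,
    -- beaten by every finite d (the loop's first iteration always updates).
    let r := (PySem.List.pyRange 1 40 1).foldl
      (fun (s : Int × Option Int) p =>
        let n_ref := pyComb (p + n_objective - 1) (n_objective - 1)
        let d := |n_ref - population_size|
        match s.2 with
        | none => (p, some d)
        | some bd => if d < bd then (p, d) else s)
      (1, none)
    max 1 r.1

-- ===== PORT B =====
def nref (M p : Int) : Int := pyComb (p + M - 1) (M - 1)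

def bsearch (M pop lo hi : Int) : Int :=
  if h : lo < hi then
    let mid := PySem.Int.floordiv (lo + hi + 1) 2
    if nref M mid ≤ pop then bsearch M pop mid hi
    else bsearch M pop lo (mid - 1)
  else lo
termination_by (hi - lo).toNat
decreasing_by
  · have hb := PySem.Int.floordiv_two_mid_bounds (lo := lo + 1) (hi := hi) (by omega)
    have : lo + hi + 1 = lo + 1 + hi := by ring
    rw [this]; omega
  · have hb := PySem.Int.floordiv_two_mid_bounds (lo := lo + 1) (hi := hi) (by omega)
    have : lo + hi + 1 = lo + 1 + hi := by ring
    rw [this]; omega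

def suggest_n_partitions_alt (n_objective : Int) (population_size : Int) : Int :=
  if n_objective ≤ 1 then 1
  else if population_size < nref n_objective 1 then 1
  else
    let lo := bsearch n_objective population_size 1 39
    if lo == 39 then 39
    else if population_size - nref n_objective lo ≤ nref n_objective (lo + 1) - population_size
      then lo else lo + 1

-- ===== PRECONDITION & SPEC =====
def Spec_suggest_n_partitions (n_objective : Int) (population_size : Int) (out : Int) : Prop := out = suggest_n_partitions_alt n_objective population_size
instance (n_objective : Int) (population_size : Int) (out : Int) : Decidable (Spec_suggest_n_partitions n_objective population_size out) := by unfold Spec_suggest_n_partitions; infer_instance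

-- ===== CLAIM (what is proved, stated in full; the proofs are below) =====
def Claim_equal_suggest_n_partitions : Prop := ∀ (n_objective : Int) (population_size : Int), Dom_suggest_n_partitions n_objective population_size → Spec_suggest_n_partitions n_objective population_size (suggest_n_partitions n_objective population_size)

-- ===== LEMMAS AND PROOFS =====

-- combLoop computes the binomial coefficient: the running product after j steps
-- is C(n-r+j, j), and each division is exact (Nat.succ_mul_choose_eq).
theorem combLoop_aux (n r : Nat) :
    ∀ j, j ≤ r → (List.range j).foldl (fun acc i => acc * (n - r + i + 1) / (i + 1)) 1
      = (n - r + j).choose j := by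
  intro j
  induction j with
  | zero => simp
  | succ j ih =>
    intro hj
    rw [List.range_succ, List.foldl_append, ih (by omega)]
    simp only [List.foldl_cons, List.foldl_nil]
    have key : (n - r + j + 1) * (n - r + j).choose j = (n - r + j + 1).choose (j + 1) * (j + 1) :=
      Nat.add_one_mul_choose_eq _ _
    have h2 : (n - r + j).choose j * (n - r + j + 1) = (n - r + j + 1).choose (j + 1) * (j + 1) := by
      rw [Nat.mul_comm]; exact key
    rw [h2, Nat.mul_div_cancel _ (by omega)]
    ring_nf

theorem combLoop_eq_choose (n r : Nat) (h : r ≤ n) : combLoop n r = n.choose r := by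
  have := combLoop_aux n r r le_rfl
  unfold combLoop
  rw [this, Nat.sub_add_cancel h]

theorem pyComb_eq_choose (n k : Int) (hk : 0 ≤ k) (hkn : k ≤ n) :
    pyComb n k = (n.toNat.choose k.toNat : Int) := by
  unfold pyComb
  rw [if_neg (by omega)]
  rcases Nat.le_total k.toNat (n.toNat - k.toNat) with h | h
  · rw [Nat.min_eq_left h, combLoop_eq_choose _ _ (by omega)]
  · rw [Nat.min_eq_right h, combLoop_eq_choose _ _ (by omega),
      Nat.choose_symm (by omega)]

-- The reference-point count is strictly increasing in p (for n_objective ≥ 2).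
theorem nref_lt_succ (M p : Int) (hM : 2 ≤ M) (hp : 1 ≤ p) : nref M p < nref M (p + 1) := by
  unfold nref
  rw [pyComb_eq_choose _ _ (by omega) (by omega), pyComb_eq_choose _ _ (by omega) (by omega)]
  have h1 : (p + 1 + M - 1).toNat = (p + M - 1).toNat + 1 := by omega
  rw [h1]
  obtain ⟨m, hm⟩ : ∃ m, (M - 1).toNat = m + 1 := ⟨(M - 2).toNat, by omega⟩
  rw [hm]
  have h2 : ((p + M - 1).toNat).choose (m + 1) < ((p + M - 1).toNat + 1).choose (m + 1) := by
    rw [Nat.choose_succ_succ]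
    have hpos : 0 < ((p + M - 1).toNat).choose m := Nat.choose_pos (by omega)
    simp only [Nat.succ_eq_add_one] at *
    omega
  exact_mod_cast h2

theorem nref_mono (M p q : Int) (hM : 2 ≤ M) (hp : 1 ≤ p) (hpq : p ≤ q) :
    nref M p ≤ nref M q := by
  induction q, hpq using Int.le_induction with
  | base => exact le_refl _
  | succ q hq ih =>
    exact le_trans ih (le_of_lt (nref_lt_succ M q hM (by omega)))

-- The loop body of port A, named for the proofs (definitionally the inline lambda).
def stepA (M pop : Int) (s : Int × Option Int) (p : Int) : Int × Option Int :=
  let n_ref := pyComb (p + M - 1) (M - 1)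
  let d := |n_ref - pop|
  match s.2 with
  | none => (p, some d)
  | some bd => if d < bd then (p, d) else s

theorem A_eq_fold (M pop : Int) (h : ¬ M ≤ 1) :
    suggest_n_partitions M pop
      = max 1 ((PySem.List.pyRange 1 40 1).foldl (stepA M pop) (1, none)).1 := by
  rw [suggest_n_partitions, if_neg h]
  rfl

-- K1: no element of l beats the current best distance ⇒ the fold is the identity.
theorem fold_no_update (M pop : Int) (l : List Int) (bp bd : Int)
    (h : ∀ p ∈ l, ¬ |nref M p - pop| < bd) :
    l.foldl (stepA M pop) (bp, some bd) = (bp, some bd) := by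
  induction l with
  | nil => rfl
  | cons x xs ih =>
    have hx := h x (by simp)
    simp only [List.foldl_cons]
    have hstep : stepA M pop (bp, some bd) x = (bp, some bd) := by
      simp only [stepA, nref] at *
      rw [if_neg hx]
    rw [hstep]
    exact ih (fun p hp => h p (by simp [hp]))

-- K2: along a strictly improving run the fold always keeps the newest element.
theorem fold_decreasing (M pop : Int) (n : Nat) :
    ∀ a : Int, (∀ p : Int, a ≤ p → p < a + n → |nref M (p + 1) - pop| < |nref M p - pop|) →
      (PySem.List.pyRange (a + 1) (a + n + 1) 1).foldl (stepA M pop) (a, some |nref M a - pop|)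
        = (a + n, some |nref M (a + n) - pop|) := by
  induction n with
  | zero =>
    intro a _
    rw [PySem.List.pyRange_one_eq_nil (by omega)]
    simp
  | succ n ih =>
    intro a hdec
    rw [PySem.List.pyRange_one_cons (by omega)]
    simp only [List.foldl_cons]
    have hstep : stepA M pop (a, some |nref M a - pop|) (a + 1)
        = (a + 1, some |nref M (a + 1) - pop|) := by
      simp only [stepA, nref]
      rw [if_pos]
      exact hdec a le_rfl (by omega)
    rw [hstep]
    have := ih (a + 1) (fun p hp hp2 => hdec p (by omega) (by push_cast at hp2 ⊢; omega))
    push_cast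
    ring_nf at this ⊢
    exact this

-- Binary-search invariant: the result L satisfies lo ≤ L ≤ hi, nref(L) ≤ pop,
-- and pop < nref(L+1) unless L = 39.
theorem bsearch_spec (M pop : Int) :
    ∀ (fuel : Nat) (lo hi : Int), (hi - lo).toNat = fuel →
      1 ≤ lo → lo ≤ hi → hi ≤ 39 → nref M lo ≤ pop → (hi < 39 → pop < nref M (hi + 1)) →
      lo ≤ bsearch M pop lo hi ∧ bsearch M pop lo hi ≤ hi ∧
        nref M (bsearch M pop lo hi) ≤ pop ∧
        (bsearch M pop lo hi < 39 → pop < nref M (bsearch M pop lo hi + 1)) := by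
  intro fuel
  induction fuel using Nat.strong_induction_on with
  | _ fuel ih =>
    intro lo hi hf h1 h2 h3 h4 h5
    rw [bsearch]
    by_cases hlt : lo < hi
    · rw [dif_pos hlt]
      have hmid := PySem.Int.floordiv_two_mid_bounds (lo := lo + 1) (hi := hi) (by omega)
      rw [show lo + hi + 1 = lo + 1 + hi from by ring] at *
      set mid := PySem.Int.floordiv (lo + 1 + hi) 2 with hmiddef
      by_cases hc : nref M mid ≤ pop
      · rw [if_pos hc]
        have := ih (hi - mid).toNat (by omega) mid hi (rfl) (by omega) (by omega) h3 hc h5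
        exact ⟨by omega, this.2.1, this.2.2.1, this.2.2.2⟩
      · rw [if_neg hc]
        have := ih (mid - 1 - lo).toNat (by omega) lo (mid - 1) (rfl) h1 (by omega) (by omega) h4
          (by intro _; rw [show mid - 1 + 1 = mid from by ring]; omega)
        exact ⟨this.1, by omega, this.2.2.1, this.2.2.2⟩
    · rw [dif_neg hlt]
      have heq : lo = hi := by omega
      subst heq
      exact ⟨le_rfl, le_rfl, h4, h5⟩

-- The heart of the proof: A's first-minimum scan equals B's boundary comparison.
theorem main_fold (M pop : Int) (hM : 2 ≤ M) :
    max 1 ((PySem.List.pyRange 1 40 1).foldl (stepA M pop) (1, none)).1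
      = suggest_n_partitions_alt M pop := by
  have hstep1 : stepA M pop (1, none) (1 : Int) = (1, some |nref M 1 - pop|) := rfl
  rw [PySem.List.pyRange_one_cons (by omega)]
  simp only [List.foldl_cons]
  by_cases hlo : pop < nref M 1
  · -- population below the smallest reference count: stays at p = 1
    rw [hstep1, fold_no_update M pop _ 1 _ ?noup]
    · simp only [suggest_n_partitions_alt, if_neg (by omega : ¬ M ≤ 1), if_pos hlo]
      rfl
    case noup =>
      intro p hp
      rw [PySem.List.mem_pyRange_one] at hp
      have hm := nref_mono M 1 p hM le_rfl (by omega)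
      rw [abs_of_nonneg (by omega), abs_of_nonneg (by omega)]
      omega
  · have hb := bsearch_spec M pop 38 1 39 (by rfl) (by omega) (by omega) (by omega)
      (by omega) (fun h => absurd h (by omega))
    set L := bsearch M pop 1 39 with hLdef
    obtain ⟨hL1, hL2, hL3, hL4⟩ := hb
    by_cases hL39 : L = 39
    · -- every reference count is below pop: the distance decreases across all 39 steps
      have hdec : ∀ p : Int, 1 ≤ p → p < 1 + ((38 : Nat) : Int) →
          |nref M (p + 1) - pop| < |nref M p - pop| := by
        intro p hp hp'
        have h1 : nref M (p + 1) ≤ nref M 39 := nref_mono M (p + 1) 39 hM (by omega) (by push_cast at hp'; omega)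
        have h2 : nref M p < nref M (p + 1) := nref_lt_succ M p hM hp
        have h3 : nref M 39 ≤ pop := by rw [← hL39]; exact hL3
        rw [abs_of_nonpos (by omega), abs_of_nonpos (by omega)]
        omega
      have hfd := fold_decreasing M pop 38 1 hdec
      simp only [show (((38 : Nat) : Int)) = 38 from rfl] at hfd
      rw [show (1 : Int) + 38 + 1 = 40 from by norm_num,
        show (1 : Int) + 38 = 39 from by norm_num] at hfd
      rw [hstep1, hfd]
      simp only [suggest_n_partitions_alt, if_neg (by omega : ¬ M ≤ 1), if_neg hlo, ← hLdef,
        hL39]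
      norm_num
    · -- L ≤ 38: the valley is at L or L + 1; ties go to L, as in A's strict update
      have hL38 : L ≤ 38 := by omega
      have hnext : pop < nref M (L + 1) := hL4 (by omega)
      rw [hstep1]
      rw [PySem.List.pyRange_one_append (1 + 1) (L + 1) 40 (by omega) (by omega),
        List.foldl_append]
      set n := (L - 1).toNat with hn
      have hnI : ((n : Nat) : Int) = L - 1 := by omega
      have hdec1 : ∀ p : Int, 1 ≤ p → p < 1 + (n : Int) →
          |nref M (p + 1) - pop| < |nref M p - pop| := by
        intro p hp hp'
        have h1 : nref M (p + 1) ≤ nref M L := nref_mono M (p + 1) L hM (by omega) (by omega)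
        have h2 : nref M p < nref M (p + 1) := nref_lt_succ M p hM hp
        rw [abs_of_nonpos (by omega), abs_of_nonpos (by omega)]
        omega
      have hfd := fold_decreasing M pop n 1 hdec1
      rw [show (1 : Int) + (n : Int) + 1 = L + 1 from by omega,
        show (1 : Int) + (n : Int) = L from by omega] at hfd
      rw [hfd]
      rw [PySem.List.pyRange_one_cons (by omega : L + 1 < 40)]
      simp only [List.foldl_cons]
      have hdLval : |nref M L - pop| = pop - nref M L := by
        rw [abs_of_nonpos (by omega)]; ring
      have hdSval : |nref M (L + 1) - pop| = nref M (L + 1) - pop := abs_of_nonneg (by omega)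
      have hstep2 : stepA M pop (L, some |nref M L - pop|) (L + 1)
          = if |nref M (L + 1) - pop| < |nref M L - pop|
            then (L + 1, some |nref M (L + 1) - pop|) else (L, some |nref M L - pop|) := rfl
      rw [hstep2]
      have hbeq : (L == (39 : Int)) = false := beq_eq_false_iff_ne.mpr (by omega)
      by_cases hc : |nref M (L + 1) - pop| < |nref M L - pop|
      · rw [if_pos hc, fold_no_update M pop _ _ _ ?hnoup1]
        case hnoup1 =>
          intro p hp
          rw [PySem.List.mem_pyRange_one] at hp
          have hm := nref_mono M (L + 1) p hM (by omega) (by omega)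
          rw [abs_of_nonneg (by omega), hdSval]
          omega
        rw [hdLval, hdSval] at hc
        simp only [suggest_n_partitions_alt, if_neg (by omega : ¬ M ≤ 1), if_neg hlo, ← hLdef,
          hbeq, Bool.false_eq_true, if_false, if_neg (by omega : ¬ pop - nref M L ≤ nref M (L + 1) - pop)]
        omega
      · rw [if_neg hc, fold_no_update M pop _ _ _ ?hnoup2]
        case hnoup2 =>
          intro p hp
          rw [PySem.List.mem_pyRange_one] at hp
          have hm := nref_mono M (L + 1) p hM (by omega) (by omega)
          rw [hdLval, hdSval] at hc
          rw [abs_of_nonneg (by omega), hdLval]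
          omega
        rw [hdLval, hdSval] at hc
        simp only [suggest_n_partitions_alt, if_neg (by omega : ¬ M ≤ 1), if_neg hlo, ← hLdef,
          hbeq, Bool.false_eq_true, if_false, if_pos (by omega : pop - nref M L ≤ nref M (L + 1) - pop)]
        omega

-- ===== VERDICT (by name: the statement is the Claim_ definition above) =====
theorem suggest_n_partitions_spec : Claim_equal_suggest_n_partitions := by
  intro M pop _
  unfold Spec_suggest_n_partitions
  by_cases h : M ≤ 1
  · simp [suggest_n_partitions, suggest_n_partitions_alt, if_pos h]
  · rw [A_eq_fold M pop h, main_fold M pop (by omega)]
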